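-- pv_equiv track=rewrite | github.com/Hossein-Noroozpour/codgen-mapper | convertors.py | j_date_filler
-- ===== SOURCE A (Python) =====
-- def j_date_filler(s):
--     if s is None:
--         return ""
--     d = int(s % 100)
--     ss = int(s / 100)
--     m = int(ss % 100)
--     y = int(ss / 100)
--
--     g_days_in_month = [31, 28, 31, 30, 31, 30, 31, 31, 30, 31, 30, 31]
--     j_days_in_month = [31, 31, 31, 31, 31, 31, 30, 30, 30, 30, 30, 29]
--     gy = y - 1600
--     gd = d - 1
--     g_day_no = 365 * gy + int((gy + 3) / 4) - int((gy + 99) / 100) + int((gy + 399) / 400)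
--     for i in range(0, m):
--         g_day_no += g_days_in_month[i]
--     if m > 1 and ((gy % 4 == 0 and gy % 100 != 0) or (gy % 400 == 0)):
--         g_day_no += 1
--     g_day_no += gd
--     j_day_no = g_day_no - 79
--     j_np = int(j_day_no / 12053)
--     j_day_no %= 12053
--     jy = 979 + (33 * j_np) + (4 * int(j_day_no / 1461))
--     j_day_no %= 1461
--     if j_day_no >= 366:
--         jy += int((j_day_no - 1) / 365)
--         j_day_no = (j_day_no - 1) % 365
--     j = 0
--     while True:
--         if not (j < 12 and j_day_no >= j_days_in_month[j]):
--             break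
--         j_day_no -= j_days_in_month[j]
--         j += 1
--
--     m = j + 1
--     d = j_day_no + 1
--     y = jy
--
--     return '%04d' % y + "-" + '%02d' % m + "-" + '%02d' % d
-- ===== SOURCE B (Python) =====
-- G_CUM = [0, 31, 59, 90, 120, 151, 181, 212, 243, 273, 304, 334, 365]
-- J_CUM = [31, 62, 93, 124, 155, 186, 216, 246, 276, 306, 336, 365]
--
--
-- def j_date_filler(s):
--     if s is None:
--         return ""
--     d = int(s % 100)
--     ss = int(s / 100)
--     m = int(ss % 100)
--     y = int(ss / 100)
--
--     gy = y - 1600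
--     g_day_no = 365 * gy + int((gy + 3) / 4) - int((gy + 99) / 100) + int((gy + 399) / 400)
--     # cumulative table replaces the per-month summing loop
--     g_day_no += G_CUM[m]
--     if m > 1 and ((gy % 4 == 0 and gy % 100 != 0) or (gy % 400 == 0)):
--         g_day_no += 1
--     g_day_no += d - 1
--     j_day_no = g_day_no - 79
--     j_np = int(j_day_no / 12053)
--     j_day_no %= 12053
--     jy = 979 + (33 * j_np) + (4 * int(j_day_no / 1461))
--     j_day_no %= 1461
--     if j_day_no >= 366:
--         jy += int((j_day_no - 1) / 365)
--         j_day_no = (j_day_no - 1) % 365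
--     # month = number of cumulative thresholds <= j_day_no (no subtracting loop)
--     j = sum(1 for t in J_CUM if t <= j_day_no)
--     jd = j_day_no - (J_CUM[j - 1] if j > 0 else 0) + 1
--     return '%04d' % jy + "-" + '%02d' % (j + 1) + "-" + '%02d' % jd
-- ===== Notes on version B (the rewrite author's own statement) =====
-- stated objective: simpler
-- what changed: Both month loops are replaced by precomputed cumulative-day tables: the Gregorian per-month summing loop becomes a single prefix-table lookup, and the Jalali subtracting while-loop becomes a count of cumulative thresholds <= the day number plus one prefix lookup.
import Mathlib
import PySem

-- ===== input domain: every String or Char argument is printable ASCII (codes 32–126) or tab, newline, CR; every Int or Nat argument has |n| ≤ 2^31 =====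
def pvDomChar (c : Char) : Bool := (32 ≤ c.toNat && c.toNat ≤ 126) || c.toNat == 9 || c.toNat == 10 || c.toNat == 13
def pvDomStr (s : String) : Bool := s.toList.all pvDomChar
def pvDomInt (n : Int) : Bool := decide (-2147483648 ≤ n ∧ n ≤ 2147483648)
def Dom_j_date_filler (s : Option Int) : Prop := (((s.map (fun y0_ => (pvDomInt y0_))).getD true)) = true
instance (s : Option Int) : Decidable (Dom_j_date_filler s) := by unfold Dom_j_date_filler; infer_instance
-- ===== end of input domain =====

-- B replaces A's two month loops by precomputed cumulative-day tables (lookup resp. threshold count); objective: simpler, same cost.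
-- int(x / y) in both Pythons is float division + truncation; on Dom (|s| ≤ 2^31 < 2^53) it is exactly PySem.Int.truncdiv.
-- '%04d' % n / '%02d' % n equal str(n).zfill(w) for every int, ported as PySem.Str.zfill (PySem.Int.toStr n) w.

-- ===== PORT A =====
def gdimA : List Int := [31, 28, 31, 30, 31, 30, 31, 31, 30, 31, 30, 31]
def jdimA : List Int := [31, 31, 31, 31, 31, 31, 30, 30, 30, 30, 30, 29]

-- A's `while True` month loop; j only grows while j < 12, so 12 fuel steps are exact.
def jloopA : Nat → Nat → Int → Nat × Int
  | 0, j, r => (j, r)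
  | fuel + 1, j, r =>
    if j < 12 ∧ (PySem.List.pyGet? jdimA (j : Int)).getD 0 ≤ r then
      jloopA fuel (j + 1) (r - (PySem.List.pyGet? jdimA (j : Int)).getD 0)
    else (j, r)

def j_date_filler (s : Option Int) : String :=
  match s with
  | none => ""
  | some s =>
    let d := PySem.Int.mod s 100
    let ss := PySem.Int.truncdiv s 100
    let m := PySem.Int.mod ss 100
    let y := PySem.Int.truncdiv ss 100
    let gy := y - 1600
    let gd := d - 1
    let g1 := 365 * gy + PySem.Int.truncdiv (gy + 3) 4 - PySem.Int.truncdiv (gy + 99) 100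
              + PySem.Int.truncdiv (gy + 399) 400
    let g2 := (PySem.List.pyRange 0 m 1).foldl
                (fun acc i => acc + (PySem.List.pyGet? gdimA i).getD 0) g1
    let g3 := if m > 1 ∧ ((PySem.Int.mod gy 4 = 0 ∧ PySem.Int.mod gy 100 ≠ 0) ∨ PySem.Int.mod gy 400 = 0)
              then g2 + 1 else g2
    let j0 := g3 + gd - 79
    let jnp := PySem.Int.truncdiv j0 12053
    let j1 := PySem.Int.mod j0 12053
    let jy := 979 + 33 * jnp + 4 * PySem.Int.truncdiv j1 1461
    let j2 := PySem.Int.mod j1 1461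
    let jy2 := if j2 ≥ 366 then jy + PySem.Int.truncdiv (j2 - 1) 365 else jy
    let j3 := if j2 ≥ 366 then PySem.Int.mod (j2 - 1) 365 else j2
    let p := jloopA 12 0 j3
    PySem.Str.zfill (PySem.Int.toStr jy2) 4 ++ "-"
      ++ PySem.Str.zfill (PySem.Int.toStr ((p.1 : Int) + 1)) 2 ++ "-"
      ++ PySem.Str.zfill (PySem.Int.toStr (p.2 + 1)) 2

-- ===== PORT B =====
def gcumB : List Int := [0, 31, 59, 90, 120, 151, 181, 212, 243, 273, 304, 334, 365]
def jcumB : List Int := [31, 62, 93, 124, 155, 186, 216, 246, 276, 306, 336, 365]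

def j_date_filler_alt (s : Option Int) : String :=
  match s with
  | none => ""
  | some s =>
    let d := PySem.Int.mod s 100
    let ss := PySem.Int.truncdiv s 100
    let m := PySem.Int.mod ss 100
    let y := PySem.Int.truncdiv ss 100
    let gy := y - 1600
    let g1 := 365 * gy + PySem.Int.truncdiv (gy + 3) 4 - PySem.Int.truncdiv (gy + 99) 100
              + PySem.Int.truncdiv (gy + 399) 400
    let g2 := g1 + (PySem.List.pyGet? gcumB m).getD 0
    let g3 := if m > 1 ∧ ((PySem.Int.mod gy 4 = 0 ∧ PySem.Int.mod gy 100 ≠ 0) ∨ PySem.Int.mod gy 400 = 0)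
              then g2 + 1 else g2
    let j0 := g3 + (d - 1) - 79
    let jnp := PySem.Int.truncdiv j0 12053
    let j1 := PySem.Int.mod j0 12053
    let jy := 979 + 33 * jnp + 4 * PySem.Int.truncdiv j1 1461
    let j2 := PySem.Int.mod j1 1461
    let jy2 := if j2 ≥ 366 then jy + PySem.Int.truncdiv (j2 - 1) 365 else jy
    let j3 := if j2 ≥ 366 then PySem.Int.mod (j2 - 1) 365 else j2
    let j := jcumB.countP (fun t => decide (t ≤ j3))
    let jd := j3 - (if j > 0 then (PySem.List.pyGet? jcumB ((j : Int) - 1)).getD 0 else 0) + 1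
    PySem.Str.zfill (PySem.Int.toStr jy2) 4 ++ "-"
      ++ PySem.Str.zfill (PySem.Int.toStr ((j : Int) + 1)) 2 ++ "-"
      ++ PySem.Str.zfill (PySem.Int.toStr jd) 2

-- ===== PRECONDITION & SPEC =====
-- Pre_ excludes exactly the inputs where A raises IndexError: month field m = (int(s/100)) % 100 ≥ 13
-- makes A index g_days_in_month[12].
def Pre_j_date_filler (s : Option Int) : Prop :=
  s.all (fun n => decide (PySem.Int.mod (PySem.Int.truncdiv n 100) 100 ≤ 12)) = true
instance (s : Option Int) : Decidable (Pre_j_date_filler s) := by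
  unfold Pre_j_date_filler; infer_instance

def pvWitness_j_date_filler : Option Int := some 20240101

def Spec_j_date_filler (s : Option Int) (out : String) : Prop := out = j_date_filler_alt s
instance (s : Option Int) (out : String) : Decidable (Spec_j_date_filler s out) := by
  unfold Spec_j_date_filler; infer_instance

-- ===== CLAIM (what is proved, stated in full; the proofs are below) =====
def Claim_equal_j_date_filler : Prop :=
  ∀ (s : Option Int), Dom_j_date_filler s → Pre_j_date_filler s →
    Spec_j_date_filler s (j_date_filler s)

-- ===== LEMMAS AND PROOFS =====

-- A's Gregorian month-sum loop equals the cumulative-table lookup, for the months Pre_ admits.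
lemma gsum_eq (g0 m : Int) (h0 : 0 ≤ m) (h1 : m ≤ 12) :
    (PySem.List.pyRange 0 m 1).foldl (fun acc i => acc + (PySem.List.pyGet? gdimA i).getD 0) g0
      = g0 + (PySem.List.pyGet? gcumB m).getD 0 := by
  interval_cases m <;> rw [PySem.List.foldl_add] <;> congr 1

-- A's subtracting month loop equals the threshold count / prefix lookup, on every residue day number.
set_option maxRecDepth 40000 in
lemma jloop_eq (n : Int) (h0 : 0 ≤ n) (h1 : n ≤ 365) :
    jloopA 12 0 n
      = (jcumB.countP (fun t => decide (t ≤ n)),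
         n - (if jcumB.countP (fun t => decide (t ≤ n)) > 0 then
                (PySem.List.pyGet? jcumB ((jcumB.countP (fun t => decide (t ≤ n)) : Int) - 1)).getD 0
              else 0)) := by
  have key : ∀ k : Fin 366, jloopA 12 0 ((k : Nat) : Int)
      = (jcumB.countP (fun t => decide (t ≤ ((k : Nat) : Int))),
         ((k : Nat) : Int) - (if jcumB.countP (fun t => decide (t ≤ ((k : Nat) : Int))) > 0 then
                (PySem.List.pyGet? jcumB ((jcumB.countP (fun t => decide (t ≤ ((k : Nat) : Int))) : Int) - 1)).getD 0
              else 0)) := by decide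
  have hn : n = ((n.toNat : Nat) : Int) := (Int.toNat_of_nonneg h0).symm
  rw [hn]
  exact key ⟨n.toNat, by omega⟩

-- jloop_eq specialised to the residue A and B actually compute (bounds come from the mods).
lemma jloop_if_eq (x : Int) :
    jloopA 12 0 (if PySem.Int.mod x 1461 ≥ 366 then PySem.Int.mod (PySem.Int.mod x 1461 - 1) 365 else PySem.Int.mod x 1461)
      = ((jcumB.countP (fun t => decide (t ≤ (if PySem.Int.mod x 1461 ≥ 366 then PySem.Int.mod (PySem.Int.mod x 1461 - 1) 365 else PySem.Int.mod x 1461)))),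
         (if PySem.Int.mod x 1461 ≥ 366 then PySem.Int.mod (PySem.Int.mod x 1461 - 1) 365 else PySem.Int.mod x 1461)
           - (if jcumB.countP (fun t => decide (t ≤ (if PySem.Int.mod x 1461 ≥ 366 then PySem.Int.mod (PySem.Int.mod x 1461 - 1) 365 else PySem.Int.mod x 1461))) > 0 then
                (PySem.List.pyGet? jcumB ((jcumB.countP (fun t => decide (t ≤ (if PySem.Int.mod x 1461 ≥ 366 then PySem.Int.mod (PySem.Int.mod x 1461 - 1) 365 else PySem.Int.mod x 1461))) : Int) - 1)).getD 0
              else 0)) := by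
  apply jloop_eq
  · split_ifs <;> exact PySem.Int.mod_nonneg _ (by norm_num)
  · split_ifs with h
    · have := PySem.Int.mod_lt (PySem.Int.mod x 1461 - 1) (b := 365) (by norm_num); omega
    · omega

-- ===== VERDICT (by name: the statement is the Claim_ definition above) =====
theorem j_date_filler_spec : Claim_equal_j_date_filler := by
  intro s hdom hpre
  cases s with
  | none => rfl
  | some n =>
    have hm0 : 0 ≤ PySem.Int.mod (PySem.Int.truncdiv n 100) 100 :=
      PySem.Int.mod_nonneg _ (by norm_num)
    have hm1 : PySem.Int.mod (PySem.Int.truncdiv n 100) 100 ≤ 12 := by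
      simpa [Pre_j_date_filler] using hpre
    simp only [Spec_j_date_filler, j_date_filler, j_date_filler_alt]
    rw [gsum_eq _ _ hm0 hm1, jloop_if_eq]
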